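-- pv_equiv track=rewrite | github.com/sdqzln/reasoner | data_utils_15_category.py | statics_polarity
-- ===== SOURCE A (Python) =====
-- def statics_polarity(labels):
--     pos = 0
--     neg = 0
--     neu = 0
--     for lable in labels:
--         if lable == 2:
--             pos += 1
--         if lable == 0:
--             neg += 1
--         if lable == 1:
--             neu += 1
--     return pos, neg, neu
-- ===== SOURCE B (Python) =====
-- def statics_polarity(labels):
--     return labels.count(2), labels.count(0), labels.count(1)
-- ===== Notes on version B (the rewrite author's own statement) =====
-- stated objective: simpler
-- what changed: Replaces the single accumulator loop with three if-increments by three independent list.count passes, one per label value, returned directly as the tuple.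
import Mathlib
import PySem

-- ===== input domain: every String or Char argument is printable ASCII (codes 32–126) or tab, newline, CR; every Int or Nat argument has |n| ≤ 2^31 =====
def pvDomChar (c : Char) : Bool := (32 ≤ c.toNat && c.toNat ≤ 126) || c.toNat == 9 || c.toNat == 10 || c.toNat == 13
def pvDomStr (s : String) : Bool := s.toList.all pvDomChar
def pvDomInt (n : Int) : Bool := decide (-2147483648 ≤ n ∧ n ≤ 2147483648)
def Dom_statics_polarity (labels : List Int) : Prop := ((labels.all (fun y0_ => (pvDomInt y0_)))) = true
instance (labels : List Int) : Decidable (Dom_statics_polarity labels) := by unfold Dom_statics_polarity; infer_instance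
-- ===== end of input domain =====

-- B replaces the single accumulator loop by three independent list.count passes (simpler).
-- ===== PORT A =====
def statics_polarity (labels : List Int) : Int × Int × Int :=
  let s := labels.foldl (fun (st : Int × Int × Int) lable =>
    let st := if lable == 2 then (st.1 + 1, st.2.1, st.2.2) else st
    let st := if lable == 0 then (st.1, st.2.1 + 1, st.2.2) else st
    let st := if lable == 1 then (st.1, st.2.1, st.2.2 + 1) else st
    st) (0, 0, 0)
  s

-- ===== PORT B =====
def statics_polarity_alt (labels : List Int) : Int × Int × Int :=
  (PySem.List.count labels 2, PySem.List.count labels 0, PySem.List.count labels 1)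

-- ===== PRECONDITION & SPEC =====
def Spec_statics_polarity (labels : List Int) (out : Int × Int × Int) : Prop := out = statics_polarity_alt labels
instance (labels : List Int) (out : Int × Int × Int) : Decidable (Spec_statics_polarity labels out) := by unfold Spec_statics_polarity; infer_instance

-- ===== CLAIM =====
def Claim_equal_statics_polarity : Prop := ∀ (labels : List Int), Dom_statics_polarity labels → Spec_statics_polarity labels (statics_polarity labels)

-- ===== LEMMAS AND PROOFS =====
theorem sp_loop (labels : List Int) (p n u : Int) :
    labels.foldl (fun (st : Int × Int × Int) lable =>
      let st := if lable == 2 then (st.1 + 1, st.2.1, st.2.2) else st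
      let st := if lable == 0 then (st.1, st.2.1 + 1, st.2.2) else st
      let st := if lable == 1 then (st.1, st.2.1, st.2.2 + 1) else st
      st) (p, n, u)
    = (p + labels.count 2, n + labels.count 0, u + labels.count 1) := by
  induction labels generalizing p n u with
  | nil => simp
  | cons x xs ih =>
    simp only [List.foldl_cons, List.count_cons, ih]
    by_cases h2 : x = 2 <;> by_cases h0 : x = 0 <;> by_cases h1 : x = 1 <;>
      simp [h2, h0, h1] <;> omega

-- ===== VERDICT =====
theorem statics_polarity_spec : Claim_equal_statics_polarity := by
  intro labels _
  unfold Spec_statics_polarity statics_polarity statics_polarity_alt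
  rw [sp_loop]
  simp [PySem.List.count_eq]
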